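-- pv_equiv track=rewrite | github.com/himaja007/scaler | dsa_notes/intermediateLevelDSA/arrays/aq5_MultipleLeftRotationsOfTheArray.py | solve
-- ===== SOURCE A (Python) =====
-- def solve(A, B):
--     n = len(A)
--     res = []
--
--     for x in B:
--         k = x % n                  # effective rotations
--         rotated = A[k:] + A[:k]    # left rotation by k
--         res.append(rotated)
--
--     return res
-- ===== SOURCE B (Python) =====
-- def solve(A, B):
--     n = len(A)
--     cache = {}
--     res = []
--     for x in B:
--         k = x % n
--         if k not in cache:
--             cache[k] = [A[(k + i) % n] for i in range(n)]
--         res.append(cache[k])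
--     return res
-- ===== Notes on version B (the rewrite author's own statement) =====
-- stated objective: alternative
-- what changed: B never slices or concatenates: each rotation is built element-wise by a modular-index gather A[(k+i)%n], and a dictionary keyed by the effective residue k memoizes it so each distinct rotation is constructed only once across all queries.
import Mathlib
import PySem

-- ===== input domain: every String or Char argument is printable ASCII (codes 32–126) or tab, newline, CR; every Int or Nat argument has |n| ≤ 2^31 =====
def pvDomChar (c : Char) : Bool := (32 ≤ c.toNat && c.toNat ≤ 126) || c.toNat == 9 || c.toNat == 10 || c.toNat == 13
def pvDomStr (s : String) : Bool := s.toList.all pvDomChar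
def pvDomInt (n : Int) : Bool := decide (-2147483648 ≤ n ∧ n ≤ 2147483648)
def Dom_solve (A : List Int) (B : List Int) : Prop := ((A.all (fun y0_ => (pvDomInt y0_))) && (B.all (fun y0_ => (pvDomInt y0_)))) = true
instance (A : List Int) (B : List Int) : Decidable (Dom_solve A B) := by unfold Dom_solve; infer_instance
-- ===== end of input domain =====

-- B replaces per-query slice-and-concat with a memoized element-wise modular-index gather:
-- a dict keyed by the residue k holds each distinct rotation, built once as [A[(k+i)%n] for i in range(n)].


-- ===== PORT A =====
def solve (A : List Int) (B : List Int) : List (List Int) :=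
  let n : Int := (A.length : Int)
  B.foldl (fun res x =>
    let k := PySem.Int.mod x n
    let rotated := PySem.List.slice A (some k) none ++ PySem.List.slice A none (some k)
    res ++ [rotated]) []

-- ===== PORT B =====
-- the comprehension [A[(k + i) % n] for i in range(n)]; index always in range when n > 0
def solveAltGather (A : List Int) (k : Int) : List Int :=
  (PySem.List.pyRange 0 (A.length : Int) 1).map
    (fun i => PySem.List.pyGetD A (PySem.Int.mod (k + i) (A.length : Int)) 0)

def solve_alt (A : List Int) (B : List Int) : List (List Int) :=
  let n : Int := (A.length : Int)
  (B.foldl (fun (st : PySem.Dict Int (List Int) × List (List Int)) x =>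
    let k := PySem.Int.mod x n
    let cache := if st.1.contains k then st.1 else st.1.insert k (solveAltGather A k)
    (cache, st.2 ++ [cache.getD k []])) (PySem.Dict.empty, [])).2

-- ===== PRECONDITION & SPEC =====
-- Pre_ excludes only the inputs where Python A raises ZeroDivisionError: A = [] with B nonempty (x % 0).
def Pre_solve (A : List Int) (B : List Int) : Prop := A ≠ [] ∨ B = []
instance (A : List Int) (B : List Int) : Decidable (Pre_solve A B) := by unfold Pre_solve; infer_instance
def pvWitness_solve : List Int × List Int := ([1, 2, 3], [0, 1, 5, -2])
def Spec_solve (A : List Int) (B : List Int) (out : List (List Int)) : Prop := out = solve_alt A B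
instance (A : List Int) (B : List Int) (out : List (List Int)) : Decidable (Spec_solve A B out) := by unfold Spec_solve; infer_instance

-- ===== CLAIM (what is proved, stated in full; the proofs are below) =====
def Claim_equal_solve : Prop := ∀ (A : List Int) (B : List Int), Dom_solve A B → Pre_solve A B → Spec_solve A B (solve A B)

-- ===== LEMMAS AND PROOFS =====

-- A's slice-and-concat rotation, named for the proofs
def rotA (A : List Int) (k : Int) : List Int :=
  PySem.List.slice A (some k) none ++ PySem.List.slice A none (some k)

-- the modular gather equals the slice-and-concat rotation (0 ≤ k < n)
lemma gather_eq (A : List Int) (k : Int) (hk0 : 0 ≤ k) (hklt : k < (A.length : Int)) :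
    solveAltGather A k = rotA A k := by
  have hkt : k.toNat ≤ A.length := by omega
  unfold solveAltGather rotA
  rw [PySem.List.slice_from _ hk0, PySem.List.slice_to _ hk0]
  apply List.ext_getElem
  · simp [PySem.List.length_pyRange_one]; omega
  · intro i h1 h2
    have hi : i < A.length := by
      simpa [PySem.List.length_pyRange_one] using h1
    rw [List.getElem_map, PySem.List.getElem_pyRange_one]
    by_cases hcase : k.toNat + i < A.length
    · have hm : PySem.Int.mod (k + (0 + (i : Int))) (A.length : Int)
          = ((k.toNat + i : Nat) : Int) := by
        rw [PySem.Int.mod_eq_emod_of_pos (by omega)]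
        rw [Int.emod_eq_of_lt (by omega) (by omega)]
        push_cast; omega
      rw [hm, PySem.List.pyGetD_natCast]
      rw [List.getElem_append_left (by simp; omega)]
      rw [List.getElem_drop]
      exact List.getD_eq_getElem A 0 (by omega)
    · have hm : PySem.Int.mod (k + (0 + (i : Int))) (A.length : Int)
          = ((k.toNat + i - A.length : Nat) : Int) := by
        rw [PySem.Int.mod_eq_emod_of_pos (by omega)]
        have h2n : k + (0 + (i : Int)) - (A.length : Int)
            = ((k.toNat + i - A.length : Nat) : Int) := by omega
        rw [← Int.sub_emod_right (k + (0 + (i:Int))) (A.length : Int), h2n]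
        exact Int.emod_eq_of_lt (by omega) (by omega)
      rw [hm, PySem.List.pyGetD_natCast]
      rw [List.getElem_append_right (by simp; omega)]
      rw [List.getElem_take]
      have : k.toNat + i - A.length = i - (A.drop k.toNat).length := by simp; omega
      rw [this]
      exact List.getD_eq_getElem A 0 (by simp at h2 ⊢; omega)

-- the fold of B's state machine returns A's fold, under the cache invariant
lemma loop_eq (A : List Int) (hA : A ≠ []) (B : List Int) :
    ∀ (cache : PySem.Dict Int (List Int)) (res : List (List Int)),
      (∀ k v, cache.get? k = some v → v = solveAltGather A k) →
      (B.foldl (fun (st : PySem.Dict Int (List Int) × List (List Int)) x =>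
        let k := PySem.Int.mod x (A.length : Int)
        let cache := if st.1.contains k then st.1 else st.1.insert k (solveAltGather A k)
        (cache, st.2 ++ [cache.getD k []])) (cache, res)).2
      = B.foldl (fun res x =>
          let k := PySem.Int.mod x (A.length : Int)
          res ++ [rotA A k]) res := by
  induction B with
  | nil => intro cache res _; rfl
  | cons x B ih =>
      intro cache res hinv
      have hn : (0 : Int) < (A.length : Int) := by
        have := List.length_pos_iff.mpr hA; exact_mod_cast this
      set k : Int := PySem.Int.mod x (A.length : Int) with hk
      simp only [List.foldl_cons]
      rw [show PySem.Int.mod x (A.length : Int) = k from hk.symm]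
      by_cases hc : cache.contains k = true
      · have hsome : (cache.get? k).isSome := by
          rw [← PySem.Dict.contains_eq_isSome_get?]; exact hc
        obtain ⟨v, hv⟩ := Option.isSome_iff_exists.mp hsome
        have hval : cache.getD k [] = solveAltGather A k := by
          rw [PySem.Dict.getD_of_get?_eq_some cache ([]) hv, hinv k v hv]
        simp only [hc, if_true]
        rw [ih cache (res ++ [cache.getD k []]) hinv, hval,
            gather_eq A k (PySem.Int.mod_nonneg x hn) (PySem.Int.mod_lt x hn)]
      · have hc' : cache.contains k = false := by simpa using hc
        simp only [hc', Bool.false_eq_true, if_false]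
        have hval : (cache.insert k (solveAltGather A k)).getD k [] = solveAltGather A k :=
          PySem.Dict.getD_insert_self _ _ _ _
        have hinv' : ∀ k' v, (cache.insert k (solveAltGather A k)).get? k' = some v →
            v = solveAltGather A k' := by
          intro k' v hv
          rw [PySem.Dict.get?_insert] at hv
          split_ifs at hv with he
          · subst he; exact (Option.some.injEq _ _ ▸ hv).symm
          · exact hinv k' v hv
        rw [ih _ (res ++ [(cache.insert k (solveAltGather A k)).getD k []]) hinv', hval,
            gather_eq A k (PySem.Int.mod_nonneg x hn) (PySem.Int.mod_lt x hn)]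

-- ===== VERDICT (by name: the statement is the Claim_ definition above) =====
theorem solve_spec : Claim_equal_solve := by
  intro A B _ hpre
  unfold Spec_solve solve solve_alt
  rcases hpre with hA | hB
  · exact (loop_eq A hA B PySem.Dict.empty []
      (fun k v h => by simp [PySem.Dict.get?_empty] at h)).symm
  · subst hB; rfl
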